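-- pv_equiv track=rewrite | github.com/sustainet-guardian/aletheia-probe | src/aletheia_probe/openalex.py | calculate_recent_publications
-- ===== SOURCE A (Python) =====
-- def calculate_recent_publications(
--     publication_years: list[int], recent_years: int = 3
-- ) -> int:
--     """Calculate count of recent publications from year list.
--
--     Args:
--         publication_years: List of publication years
--         recent_years: Parameter controlling which years count as "recent"
--
--     Returns:
--         Count of publications in recent years
--     """
--     if not publication_years:
--         return 0
--
--     # Find the most recent year in the data
--     max_year = max(publication_years)
--
--     # Special handling: recent_years <= 2 means only max year
--     # recent_years > 2 means max_year back to (max_year - recent_years + 1)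
--     if recent_years <= 2:
--         cutoff = max_year
--     else:
--         cutoff = max_year - (recent_years - 1)
--
--     return sum(1 for year in publication_years if year >= cutoff)
-- ===== SOURCE B (Python) =====
-- def calculate_recent_publications(publication_years: list[int], recent_years: int = 3) -> int:
--     """Sort-then-scan: sort descending, max is the head, count the prefix of
--     years >= cutoff, stopping at the first year below it."""
--     if not publication_years:
--         return 0
--     ys = sorted(publication_years, reverse=True)
--     max_year = ys[0]
--     cutoff = max_year if recent_years <= 2 else max_year - (recent_years - 1)
--     n = 0
--     for y in ys:
--         if y < cutoff:
--             break
--         n += 1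
--     return n
-- ===== Notes on version B (the rewrite author's own statement) =====
-- stated objective: alternative
-- what changed: B sorts the years in descending order, reads the maximum off the head, and counts the qualifying prefix with an early-exit scan that stops at the first year below the cutoff, instead of A's max pass plus a full per-element filtered count.
import Mathlib
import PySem

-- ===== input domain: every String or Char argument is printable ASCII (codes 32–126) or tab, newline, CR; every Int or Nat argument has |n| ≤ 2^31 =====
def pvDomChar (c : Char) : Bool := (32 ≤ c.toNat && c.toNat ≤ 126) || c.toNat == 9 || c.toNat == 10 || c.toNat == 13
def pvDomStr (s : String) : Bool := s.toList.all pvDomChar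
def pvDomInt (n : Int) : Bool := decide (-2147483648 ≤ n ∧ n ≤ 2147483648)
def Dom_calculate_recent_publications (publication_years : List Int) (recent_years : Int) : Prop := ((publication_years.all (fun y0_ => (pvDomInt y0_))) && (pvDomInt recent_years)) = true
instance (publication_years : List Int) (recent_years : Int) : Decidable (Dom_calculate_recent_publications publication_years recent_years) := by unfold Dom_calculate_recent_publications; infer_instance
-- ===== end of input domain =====

-- B sorts descending and counts the qualifying prefix with an early-exit scan (objective: alternative).

-- ===== PORT A =====
def calculate_recent_publications (publication_years : List Int) (recent_years : Int) : Int :=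
  if publication_years = [] then 0
  else
    match PySem.List.max? publication_years (fun y => y) with
    | none => 0  -- unreachable: list nonempty
    | some max_year =>
      let cutoff := if recent_years ≤ 2 then max_year else max_year - (recent_years - 1)
      publication_years.foldl (fun acc year => if year ≥ cutoff then acc + 1 else acc) 0

-- ===== PORT B =====
-- the for-loop with break: count leading elements ≥ cutoff, stop at the first below
def pvPrefixCount (cutoff : Int) : List Int → Int
  | [] => 0
  | y :: t => if y < cutoff then 0 else pvPrefixCount cutoff t + 1

def calculate_recent_publications_alt (publication_years : List Int) (recent_years : Int) : Int :=
  if publication_years = [] then 0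
  else
    let ys := PySem.List.sorted publication_years (fun y => y) true
    match ys with
    | [] => 0  -- unreachable: ys is a permutation of a nonempty list
    | max_year :: _ =>
      let cutoff := if recent_years ≤ 2 then max_year else max_year - (recent_years - 1)
      pvPrefixCount cutoff ys

-- ===== PRECONDITION & SPEC =====
def Spec_calculate_recent_publications (publication_years : List Int) (recent_years : Int) (out : Int) : Prop := out = calculate_recent_publications_alt publication_years recent_years
instance (publication_years : List Int) (recent_years : Int) (out : Int) : Decidable (Spec_calculate_recent_publications publication_years recent_years out) := by unfold Spec_calculate_recent_publications; infer_instance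

-- ===== CLAIM (what is proved, stated in full; the proofs are below) =====
def Claim_equal_calculate_recent_publications : Prop := ∀ (publication_years : List Int) (recent_years : Int), Dom_calculate_recent_publications publication_years recent_years → Spec_calculate_recent_publications publication_years recent_years (calculate_recent_publications publication_years recent_years)

-- ===== LEMMAS AND PROOFS =====

-- the guarded foldl-count equals countP
theorem pv_foldl_countP (c : Int) (l : List Int) (init : Int) :
    l.foldl (fun acc y => if y ≥ c then acc + 1 else acc) init
      = init + (l.countP (fun y => decide (c ≤ y)) : Nat) := by
  induction l generalizing init with
  | nil => simp
  | cons a t ih =>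
    by_cases h : c ≤ a
    · simp [List.foldl, ih, h, ge_iff_le]; ring
    · simp [List.foldl, ih, h, ge_iff_le]

-- on a descending list the early-exit prefix count equals countP
theorem pv_prefixCount_eq_countP (c : Int) (l : List Int)
    (h : l.Pairwise (fun a b => b ≤ a)) :
    pvPrefixCount c l = (l.countP (fun y => decide (c ≤ y)) : Nat) := by
  induction l with
  | nil => simp [pvPrefixCount]
  | cons a t ih =>
    rw [List.pairwise_cons] at h
    by_cases hac : a < c
    · have hz : t.countP (fun y => decide (c ≤ y)) = 0 := by
        rw [List.countP_eq_zero]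
        intro y hy
        have := h.1 y hy
        simp only [decide_eq_true_eq]
        omega
      simp [pvPrefixCount, hac, hz, not_le.mpr hac]
    · have hca : c ≤ a := not_lt.mp hac
      simp [pvPrefixCount, not_lt.mpr hca, ih h.2, hca]

-- ===== VERDICT (by name: the statement is the Claim_ definition above) =====
theorem calculate_recent_publications_spec : Claim_equal_calculate_recent_publications := by
  intro pys ry _
  unfold Spec_calculate_recent_publications calculate_recent_publications calculate_recent_publications_alt
  by_cases h : pys = []
  · simp [h]
  · simp only [if_neg h]
    cases hs : PySem.List.sorted pys (fun y => y) true with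
    | nil => exact absurd ((PySem.List.sorted_eq_nil_iff _ _ _).mp hs) h
    | cons m t =>
      -- the head of the descending sort is the (value of the) max
      have hperm : (PySem.List.sorted pys (fun y => y) true).Perm pys :=
        PySem.List.sorted_perm _ _ _
      have hmem : m ∈ pys := hperm.mem_iff.mp (by rw [hs]; simp)
      have hge : ∀ y ∈ pys, y ≤ m := PySem.List.key_head_sorted_rev_ge pys (fun y => y) hs
      obtain ⟨m', hm'⟩ : ∃ x, PySem.List.max? pys (fun y => y) = some x := by
        cases hx : PySem.List.max? pys (fun y => y) with
        | none => exact absurd ((PySem.List.max?_eq_none_iff _ _).mp hx) h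
        | some x => exact ⟨x, rfl⟩
      have hmm : m' = m := le_antisymm (hge m' (PySem.List.max?_mem hm'))
        (PySem.List.max?_isMax hm' m hmem)
      rw [hm', hmm]
      simp only []
      set c := if ry ≤ 2 then m else m - (ry - 1) with hc
      have hpair : (m :: t).Pairwise (fun a b => b ≤ a) := by
        rw [← hs]; exact PySem.List.sorted_pairwise_rev pys (fun y => y)
      have hcnt : (m :: t).countP (fun y => decide (c ≤ y)) = pys.countP (fun y => decide (c ≤ y)) := by
        rw [← hs]; exact hperm.countP_eq _
      rw [pv_foldl_countP c pys 0, pv_prefixCount_eq_countP c (m :: t) hpair, hcnt, zero_add]
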